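-- pv_equiv track=rewrite | github.com/automated-construction/ACORN-reinforcement | src/acorn_reinforcement/misc.py | unjson_lines
-- ===== SOURCE A (Python) =====
-- def unjson_lines(lines):
-- 	lines_2 = []
-- 	line = []
-- 	point = []
-- 	for i, xyz in enumerate(lines):
-- 		point.append(xyz)
-- 		if i % 3 == 2:
-- 			line.append(point)
-- 			point = []
-- 		if i % 6 == 5:
-- 			lines_2.append(line)
-- 			line = []
-- 	return lines_2
-- ===== SOURCE B (Python) =====
-- def unjson_lines(lines):
-- 	return [[lines[6 * k:6 * k + 3], lines[6 * k + 3:6 * k + 6]]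
-- 	        for k in range(len(lines) // 6)]
-- ===== Notes on version B (the rewrite author's own statement) =====
-- stated objective: simpler
-- what changed: Replaces the stateful modular-counter loop (three accumulators, two mod tests per element) by a single list comprehension that slices each complete 6-element chunk directly, with len//6 dropping the trailing incomplete chunk.
import Mathlib
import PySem

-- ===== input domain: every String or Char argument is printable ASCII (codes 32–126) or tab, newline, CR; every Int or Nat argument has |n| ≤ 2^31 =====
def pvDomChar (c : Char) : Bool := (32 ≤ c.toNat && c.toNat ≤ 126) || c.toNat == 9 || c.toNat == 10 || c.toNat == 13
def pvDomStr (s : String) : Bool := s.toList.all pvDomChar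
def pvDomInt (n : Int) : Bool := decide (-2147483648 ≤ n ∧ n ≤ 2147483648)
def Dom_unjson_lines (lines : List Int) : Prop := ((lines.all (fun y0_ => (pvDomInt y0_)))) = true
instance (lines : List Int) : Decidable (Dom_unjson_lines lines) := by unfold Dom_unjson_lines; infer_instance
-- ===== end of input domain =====

-- B replaces A's stateful modular-counter loop by a slicing list comprehension (same cost, simpler).

-- ===== PORT A =====
-- the body of A's for-loop, as a step function over the state (lines_2, line, point)
def stepA (st : List (List (List Int)) × List (List Int) × List Int) (ix : Int × Int) :
    List (List (List Int)) × List (List Int) × List Int :=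
  let point := st.2.2 ++ [ix.2]
  let lp := if PySem.Int.mod ix.1 3 = 2 then (st.2.1 ++ [point], ([] : List Int)) else (st.2.1, point)
  if PySem.Int.mod ix.1 6 = 5 then (st.1 ++ [lp.1], [], lp.2) else (st.1, lp.1, lp.2)

def unjson_lines (lines : List Int) : List (List (List Int)) :=
  ((PySem.List.enumerate lines 0).foldl stepA ([], [], [])).1

-- ===== PORT B =====
def unjson_lines_alt (lines : List Int) : List (List (List Int)) :=
  (PySem.List.pyRange 0 (PySem.Int.floordiv (lines.length : Int) 6) 1).map
    (fun k => [PySem.List.slice lines (some (6 * k)) (some (6 * k + 3)),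
               PySem.List.slice lines (some (6 * k + 3)) (some (6 * k + 6))])

-- ===== PRECONDITION & SPEC =====
def Spec_unjson_lines (lines : List Int) (out : List (List (List Int))) : Prop := out = unjson_lines_alt lines
instance (lines : List Int) (out : List (List (List Int))) : Decidable (Spec_unjson_lines lines out) := by unfold Spec_unjson_lines; infer_instance

-- ===== CLAIM (what is proved, stated in full; the proofs are below) =====
def Claim_equal_unjson_lines : Prop := ∀ (lines : List Int), Dom_unjson_lines lines → Spec_unjson_lines lines (unjson_lines lines)

-- ===== LEMMAS AND PROOFS =====

-- the common characterisation: group into complete 6-chunks, split each into two 3-point halves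
def chunks : List Int → List (List (List Int))
  | a :: b :: c :: d :: e :: f :: rest => [[a, b, c], [d, e, f]] :: chunks rest
  | _ => []

lemma stepA_plain (l2 : List (List (List Int))) (line : List (List Int)) (pt : List Int)
    (i x : Int) (h3 : ¬ i % 3 = 2) (h6 : ¬ i % 6 = 5) :
    stepA (l2, line, pt) (i, x) = (l2, line, pt ++ [x]) := by
  simp [stepA, h3, h6]

lemma stepA_point (l2 : List (List (List Int))) (line : List (List Int)) (pt : List Int)
    (i x : Int) (h3 : i % 3 = 2) (h6 : ¬ i % 6 = 5) :
    stepA (l2, line, pt) (i, x) = (l2, line ++ [pt ++ [x]], []) := by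
  simp [stepA, h3, h6]

lemma stepA_line (l2 : List (List (List Int))) (line : List (List Int)) (pt : List Int)
    (i x : Int) (h3 : i % 3 = 2) (h6 : i % 6 = 5) :
    stepA (l2, line, pt) (i, x) = (l2 ++ [line ++ [pt ++ [x]]], [], []) := by
  simp [stepA, h3, h6]

lemma loopA : ∀ (rest : List Int) (k : Nat) (l2 : List (List (List Int))),
    ((PySem.List.enumerate rest (6 * (k : Int))).foldl stepA (l2, [], [])).1 = l2 ++ chunks rest
  | [], k, l2 => by simp [chunks]
  | [a], k, l2 => by
      simp only [PySem.List.enumerate_cons]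
      rw [List.foldl_cons, stepA_plain _ _ _ _ _ (by omega) (by omega)]
      simp [chunks]
  | [a, b], k, l2 => by
      simp only [PySem.List.enumerate_cons]
      rw [List.foldl_cons, stepA_plain _ _ _ _ _ (by omega) (by omega)]
      rw [List.foldl_cons, stepA_plain _ _ _ _ _ (by omega) (by omega)]
      simp [chunks]
  | [a, b, c], k, l2 => by
      simp only [PySem.List.enumerate_cons]
      rw [List.foldl_cons, stepA_plain _ _ _ _ _ (by omega) (by omega)]
      rw [List.foldl_cons, stepA_plain _ _ _ _ _ (by omega) (by omega)]
      rw [List.foldl_cons, stepA_point _ _ _ _ _ (by omega) (by omega)]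
      simp [chunks]
  | [a, b, c, d], k, l2 => by
      simp only [PySem.List.enumerate_cons]
      rw [List.foldl_cons, stepA_plain _ _ _ _ _ (by omega) (by omega)]
      rw [List.foldl_cons, stepA_plain _ _ _ _ _ (by omega) (by omega)]
      rw [List.foldl_cons, stepA_point _ _ _ _ _ (by omega) (by omega)]
      rw [List.foldl_cons, stepA_plain _ _ _ _ _ (by omega) (by omega)]
      simp [chunks]
  | [a, b, c, d, e], k, l2 => by
      simp only [PySem.List.enumerate_cons]
      rw [List.foldl_cons, stepA_plain _ _ _ _ _ (by omega) (by omega)]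
      rw [List.foldl_cons, stepA_plain _ _ _ _ _ (by omega) (by omega)]
      rw [List.foldl_cons, stepA_point _ _ _ _ _ (by omega) (by omega)]
      rw [List.foldl_cons, stepA_plain _ _ _ _ _ (by omega) (by omega)]
      rw [List.foldl_cons, stepA_plain _ _ _ _ _ (by omega) (by omega)]
      simp [chunks]
  | a :: b :: c :: d :: e :: f :: rest, k, l2 => by
      simp only [PySem.List.enumerate_cons]
      rw [List.foldl_cons, stepA_plain _ _ _ _ _ (by omega) (by omega)]
      rw [List.foldl_cons, stepA_plain _ _ _ _ _ (by omega) (by omega)]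
      rw [List.foldl_cons, stepA_point _ _ _ _ _ (by omega) (by omega)]
      rw [List.foldl_cons, stepA_plain _ _ _ _ _ (by omega) (by omega)]
      rw [List.foldl_cons, stepA_plain _ _ _ _ _ (by omega) (by omega)]
      rw [List.foldl_cons, stepA_line _ _ _ _ _ (by omega) (by omega)]
      have h6 : 6 * (k : Int) + 1 + 1 + 1 + 1 + 1 + 1 = 6 * ((k + 1 : Nat) : Int) := by push_cast; ring
      rw [h6, loopA rest (k + 1)]
      simp [chunks]

lemma a_eq_chunks (lines : List Int) : unjson_lines lines = chunks lines := by
  have h := loopA lines 0 []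
  simpa [unjson_lines] using h

-- shifting a nonnegative slice past one complete 6-chunk
lemma slice_shift6 (a b c d e f : Int) (rest : List Int) (x y : Int) (hx : 0 ≤ x) (hy : 0 ≤ y) :
    PySem.List.slice (a :: b :: c :: d :: e :: f :: rest) (some (x + 6)) (some (y + 6)) =
      PySem.List.slice rest (some x) (some y) := by
  rw [PySem.List.slice_toNat _ (by omega) (by omega), PySem.List.slice_toNat _ hx hy]
  have hx6 : (x + 6).toNat = x.toNat + 6 := by omega
  have hy6 : (y + 6).toNat = y.toNat + 6 := by omega
  rw [hx6, hy6]
  have h : (y.toNat + 6) - (x.toNat + 6) = y.toNat - x.toNat := by omega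
  rw [h]
  rfl

lemma chunks_short (lines : List Int) (h : lines.length < 6) : chunks lines = [] := by
  rcases lines with _ | ⟨a, _ | ⟨b, _ | ⟨c, _ | ⟨d, _ | ⟨e, _ | ⟨f, rest⟩⟩⟩⟩⟩⟩
  · rfl
  · rfl
  · rfl
  · rfl
  · rfl
  · rfl
  · exfalso; simp at h; omega

lemma alt_short (lines : List Int) (h : lines.length < 6) : unjson_lines_alt lines = [] := by
  have h0 : PySem.Int.floordiv (lines.length : Int) 6 = 0 := by
    rw [PySem.Int.floordiv_eq_ediv_of_pos (by norm_num : (0:Int) < 6)]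
    omega
  rw [unjson_lines_alt, h0, PySem.List.pyRange_one_eq_nil (by omega : (0:Int) ≤ 0)]
  rfl

lemma b_eq_chunks_bounded : ∀ (n : Nat) (lines : List Int), lines.length ≤ n →
    unjson_lines_alt lines = chunks lines := by
  intro n
  induction n with
  | zero =>
      intro lines h
      rw [alt_short lines (by omega), chunks_short lines (by omega)]
  | succ n ih =>
      intro lines hlen
      by_cases hshort : lines.length < 6
      · rw [alt_short lines hshort, chunks_short lines hshort]
      rcases lines with _ | ⟨a, _ | ⟨b, _ | ⟨c, _ | ⟨d, _ | ⟨e, _ | ⟨f, rest⟩⟩⟩⟩⟩⟩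
      · exact absurd (by norm_num) hshort
      · exact absurd (by norm_num) hshort
      · exact absurd (by norm_num) hshort
      · exact absurd (by norm_num) hshort
      · exact absurd (by norm_num) hshort
      · exact absurd (by norm_num) hshort
      -- the 6-chunk case
      have hs : 0 ≤ PySem.Int.floordiv (rest.length : Int) 6 := by
        rw [PySem.Int.floordiv_eq_ediv_of_pos (by norm_num : (0:Int) < 6)]; omega
      have hdiv : PySem.Int.floordiv (((a :: b :: c :: d :: e :: f :: rest).length : Int)) 6 =
          PySem.Int.floordiv (rest.length : Int) 6 + 1 := by
        rw [PySem.Int.floordiv_eq_ediv_of_pos (by norm_num : (0:Int) < 6),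
            PySem.Int.floordiv_eq_ediv_of_pos (by norm_num : (0:Int) < 6)]
        simp only [List.length_cons]
        push_cast
        omega
      have hrest : unjson_lines_alt rest = chunks rest := by
        apply ih
        simp only [List.length_cons] at hlen
        omega
      rw [unjson_lines_alt, hdiv,
          PySem.List.pyRange_one_cons (by omega : (0:Int) < PySem.Int.floordiv (rest.length : Int) 6 + 1),
          List.map_cons]
      have hhead : [PySem.List.slice (a :: b :: c :: d :: e :: f :: rest) (some (6 * 0)) (some (6 * 0 + 3)),
                    PySem.List.slice (a :: b :: c :: d :: e :: f :: rest) (some (6 * 0 + 3)) (some (6 * 0 + 6))] =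
                   [[a, b, c], [d, e, f]] := by
        rfl
      rw [hhead, chunks]
      congr 1
      simp only [zero_add]
      -- tail: shift each index by one chunk
      have hshift : PySem.List.pyRange 1 (PySem.Int.floordiv (rest.length : Int) 6 + 1) 1 =
          (PySem.List.pyRange 0 (PySem.Int.floordiv (rest.length : Int) 6) 1).map (fun x => x + 1) := by
        rw [PySem.List.pyRange_one, PySem.List.pyRange_one, List.map_map]
        have h1 : (PySem.Int.floordiv (rest.length : Int) 6 + 1 - 1).toNat =
            (PySem.Int.floordiv (rest.length : Int) 6 - 0).toNat := by omega
        rw [h1]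
        apply List.map_congr_left
        intro x _
        simp
        ring
      rw [hshift, List.map_map, ← hrest, unjson_lines_alt]
      apply List.map_congr_left
      intro k hk
      have hk0 : 0 ≤ k := ((PySem.List.mem_pyRange_one).1 hk).1
      simp only [Function.comp]
      have e1 : (6 : Int) * (k + 1) = 6 * k + 6 := by ring
      rw [e1, show (6 * k + 6 + 3 : Int) = (6 * k + 3) + 6 from by ring,
          slice_shift6 a b c d e f rest (6 * k) (6 * k + 3) (by omega) (by omega),
          slice_shift6 a b c d e f rest (6 * k + 3) (6 * k + 6) (by omega) (by omega)]

lemma b_eq_chunks (lines : List Int) : unjson_lines_alt lines = chunks lines :=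
  b_eq_chunks_bounded lines.length lines (le_refl _)

-- ===== VERDICT (by name: the statement is the Claim_ definition above) =====
theorem unjson_lines_spec : Claim_equal_unjson_lines := by
  intro lines _
  unfold Spec_unjson_lines
  rw [a_eq_chunks, b_eq_chunks]
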